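-- pv_equiv track=rewrite | github.com/smeas/Advent-of-Code-2023 | 01/solution.py | try_parse_digit_at
-- ===== SOURCE A (Python) =====
-- numbers = [
-- 	"one",
-- 	"two",
-- 	"three",
-- 	"four",
-- 	"five",
-- 	"six",
-- 	"seven",
-- 	"eight",
-- 	"nine",
-- ]
--
-- def try_parse_digit_at(s: str, index: int):
-- 	if s[index].isdigit():
-- 		return int(s[index])
--
-- 	substr = s[index:]
-- 	for number_index, digit in enumerate(numbers):
-- 		if substr.startswith(digit):
-- 			return number_index + 1
--
-- 	return None
-- ===== SOURCE B (Python) =====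
-- # Character-trie descent: walk s[index:] one character at a time through a static
-- # trie of the spelled-out digits instead of testing each word with startswith.
-- NUMBER_TRIE = {
--     "o": {"n": {"e": 1}},
--     "t": {"w": {"o": 2}, "h": {"r": {"e": {"e": 3}}}},
--     "f": {"o": {"u": {"r": 4}}, "i": {"v": {"e": 5}}},
--     "s": {"i": {"x": 6}, "e": {"v": {"e": {"n": 7}}}},
--     "e": {"i": {"g": {"h": {"t": 8}}}},
--     "n": {"i": {"n": {"e": 9}}},
-- }
--
-- def try_parse_digit_at(s: str, index: int):
--     if s[index].isdigit():
--         return int(s[index])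
--     node = NUMBER_TRIE
--     for ch in s[index:]:
--         node = node.get(ch)
--         if node is None:
--             return None
--         if not isinstance(node, dict):
--             return node
--     return None
-- ===== Notes on version B (the rewrite author's own statement) =====
-- stated objective: alternative
-- what changed: Replaces A's per-word scan (startswith of each of the 9 spelled words against the suffix) by a character-by-character descent of s[index:] through a static prefix trie of the words; Pre_ excludes only the out-of-range indices on which s[index] raises IndexError in both programs.
import Mathlib
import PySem

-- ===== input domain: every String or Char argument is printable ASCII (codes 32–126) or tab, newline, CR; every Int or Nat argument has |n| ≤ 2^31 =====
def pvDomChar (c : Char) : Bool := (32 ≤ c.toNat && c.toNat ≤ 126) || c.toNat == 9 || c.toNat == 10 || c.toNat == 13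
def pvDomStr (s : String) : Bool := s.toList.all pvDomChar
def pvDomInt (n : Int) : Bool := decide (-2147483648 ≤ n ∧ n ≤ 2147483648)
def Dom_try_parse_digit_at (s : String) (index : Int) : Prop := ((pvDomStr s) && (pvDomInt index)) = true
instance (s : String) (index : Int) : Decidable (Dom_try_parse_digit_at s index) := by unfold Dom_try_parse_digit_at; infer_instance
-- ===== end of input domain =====

-- B replaces A's per-word startswith scan by a character-by-character descent of the
-- suffix through a static prefix trie of the nine spelled words (objective: alternative).

-- ===== PORT A =====
def pvNumbers : List String :=
  ["one", "two", "three", "four", "five", "six", "seven", "eight", "nine"]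

def try_parse_digit_at (s : String) (index : Int) : Option Int :=
  match PySem.Str.pyGet? s index with
  | none => none   -- s[index] raises IndexError: excluded by Pre_
  | some c =>
    if PySem.Chars.isdigit c then
      PySem.Int.ofChars? [c]   -- int(s[index]); some on every ASCII digit (isdigit just held)
    else
      let substr := PySem.Str.slice s (some index) none
      (PySem.List.enumerate pvNumbers 0).foldl
        (fun (acc : Option Int) (p : Int × String) =>
          match acc with
          | some r => some r   -- already returned
          | none => if PySem.Str.startswith substr p.2 then some (p.1 + 1) else none)
        none

-- ===== PORT B =====
-- the nested-dict value type of Source B's NUMBER_TRIE: an int leaf or a sub-dict;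
-- the dict itself is the explicit child list PvTrie (a mutual pair, no nested inductive)
mutual
inductive PvNode where
  | val : Int → PvNode
  | sub : PvTrie → PvNode
inductive PvTrie where
  | nil : PvTrie
  | cons : Char → PvNode → PvTrie → PvTrie
end

-- dict.get(ch): first (only) matching key
def pvGet : PvTrie → Char → Option PvNode
  | .nil, _ => none
  | .cons k n rest, c => if k = c then some n else pvGet rest c

-- the literal NUMBER_TRIE of Source B
def pvNumberTrie : PvTrie :=
  .cons 'o' (.sub (.cons 'n' (.sub (.cons 'e' (.val 1) .nil)) .nil))
  (.cons 't' (.sub (.cons 'w' (.sub (.cons 'o' (.val 2) .nil))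
                   (.cons 'h' (.sub (.cons 'r' (.sub (.cons 'e' (.sub (.cons 'e' (.val 3) .nil)) .nil)) .nil)) .nil)))
  (.cons 'f' (.sub (.cons 'o' (.sub (.cons 'u' (.sub (.cons 'r' (.val 4) .nil)) .nil))
                   (.cons 'i' (.sub (.cons 'v' (.sub (.cons 'e' (.val 5) .nil)) .nil)) .nil)))
  (.cons 's' (.sub (.cons 'i' (.sub (.cons 'x' (.val 6) .nil))
                   (.cons 'e' (.sub (.cons 'v' (.sub (.cons 'e' (.sub (.cons 'n' (.val 7) .nil)) .nil)) .nil)) .nil)))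
  (.cons 'e' (.sub (.cons 'i' (.sub (.cons 'g' (.sub (.cons 'h' (.sub (.cons 't' (.val 8) .nil)) .nil)) .nil)) .nil))
  (.cons 'n' (.sub (.cons 'i' (.sub (.cons 'n' (.sub (.cons 'e' (.val 9) .nil)) .nil)) .nil))
  .nil)))))

-- the for-loop of Source B: node = node.get(ch); None → return None; int leaf → return it
def pvLoop : PvTrie → List Char → Option Int
  | _, [] => none
  | tr, c :: rest =>
    match pvGet tr c with
    | none => none
    | some (.val v) => some v
    | some (.sub tr') => pvLoop tr' rest

def try_parse_digit_at_alt (s : String) (index : Int) : Option Int :=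
  match PySem.Str.pyGet? s index with
  | none => none   -- s[index] raises IndexError: excluded by Pre_
  | some c =>
    if PySem.Chars.isdigit c then
      PySem.Int.ofChars? [c]
    else
      pvLoop pvNumberTrie (PySem.Str.slice s (some index) none).toList

-- ===== PRECONDITION & SPEC =====
-- Pre_ excludes exactly the inputs where s[index] raises IndexError (index out of range) in both programs.
def Pre_try_parse_digit_at (s : String) (index : Int) : Prop :=
  PySem.Raise.InRange s.toList.length index
instance (s : String) (index : Int) : Decidable (Pre_try_parse_digit_at s index) := by
  unfold Pre_try_parse_digit_at; infer_instance

def pvWitness_try_parse_digit_at : String × Int := ("two1", 0)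

def Spec_try_parse_digit_at (s : String) (index : Int) (out : Option Int) : Prop :=
  out = try_parse_digit_at_alt s index
instance (s : String) (index : Int) (out : Option Int) : Decidable (Spec_try_parse_digit_at s index out) := by
  unfold Spec_try_parse_digit_at; infer_instance

-- ===== CLAIM (what is proved, stated in full; the proofs are below) =====
def Claim_equal_try_parse_digit_at : Prop := ∀ (s : String) (index : Int), Dom_try_parse_digit_at s index → Pre_try_parse_digit_at s index → Spec_try_parse_digit_at s index (try_parse_digit_at s index)

-- ===== LEMMAS AND PROOFS =====

lemma pv_sw (w : String) (t : List Char) :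
    (PySem.Chars.startswith t w.toList = true) ↔ w.toList = t.take w.toList.length := by
  simp [PySem.Chars.startswith, List.isPrefixOf_iff_prefix, List.prefix_iff_eq_take]


lemma pv_len1 : ("one" : String).length = 3 := by decide
lemma pv_len2 : ("two" : String).length = 3 := by decide
lemma pv_len3 : ("three" : String).length = 5 := by decide
lemma pv_len4 : ("four" : String).length = 4 := by decide
lemma pv_len5 : ("five" : String).length = 4 := by decide
lemma pv_len6 : ("six" : String).length = 3 := by decide
lemma pv_len7 : ("seven" : String).length = 5 := by decide
lemma pv_len8 : ("eight" : String).length = 5 := by decide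
lemma pv_len9 : ("nine" : String).length = 4 := by decide

-- If no spelled word is a prefix of t, the trie descent fails.
-- walk semantics from a node (proof helper): a value leaf answers at once,
-- a sub-trie consumes one character
def pvRun : PvNode → List Char → Option Int
  | .val v, _ => some v
  | .sub _, [] => none
  | .sub tr, c :: r =>
    match pvGet tr c with
    | none => none
    | some n => pvRun n r

lemma pv_run_loop (r : List Char) (tr : PvTrie) : pvRun (.sub tr) r = pvLoop tr r := by
  induction r generalizing tr with
  | nil => rfl
  | cons c r ih =>
    cases h : pvGet tr c with
    | none => simp [pvRun, pvLoop, h]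
    | some n =>
      cases n with
      | val v => simp [pvRun, pvLoop, h]
      | sub tr' => simp [pvRun, pvLoop, h, ih]

-- a single-word chain in the trie
def pvChain : List Char → Int → PvNode
  | [], v => .val v
  | c :: cs, v => .sub (.cons c (pvChain cs v) .nil)

lemma pv_run_chain (cs : List Char) (v : Int) (r : List Char) :
    pvRun (pvChain cs v) r = if cs = r.take cs.length then some v else none := by
  induction cs generalizing r with
  | nil => simp [pvChain, pvRun]
  | cons c cs ih =>
    cases r with
    | nil => simp [pvChain, pvRun]
    | cons d r' =>
      by_cases hcd : c = d
      · subst hcd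
        simp [pvChain, pvRun, pvGet, ih]
      · simp [pvChain, pvRun, pvGet, hcd]

-- a two-word branching node
lemma pv_run_two (a b : Char) (cs1 cs2 : List Char) (v1 v2 : Int) (r : List Char)
    (hab : a ≠ b) :
    pvRun (.sub (.cons a (pvChain cs1 v1) (.cons b (pvChain cs2 v2) .nil))) r
      = if a :: cs1 = r.take (cs1.length + 1) then some v1
        else if b :: cs2 = r.take (cs2.length + 1) then some v2
        else none := by
  cases r with
  | nil => simp [pvRun]
  | cons d r' =>
    by_cases ha : a = d
    · subst ha
      simp [pvRun, pvGet, pv_run_chain, Ne.symm hab]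
    · by_cases hb : b = d
      · subst hb
        simp [pvRun, pvGet, pv_run_chain, ha]
      · simp [pvRun, pvGet, ha, hb]

-- If no spelled word is a prefix of t, the trie descent fails.
lemma pv_loop_none (t : List Char)
    (h1 : ¬ ['o','n','e'] = t.take 3) (h2 : ¬ ['t','w','o'] = t.take 3)
    (h3 : ¬ ['t','h','r','e','e'] = t.take 5) (h4 : ¬ ['f','o','u','r'] = t.take 4)
    (h5 : ¬ ['f','i','v','e'] = t.take 4) (h6 : ¬ ['s','i','x'] = t.take 3)
    (h7 : ¬ ['s','e','v','e','n'] = t.take 5) (h8 : ¬ ['e','i','g','h','t'] = t.take 5)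
    (h9 : ¬ ['n','i','n','e'] = t.take 4) :
    pvLoop pvNumberTrie t = none := by
  cases t with
  | nil => rfl
  | cons c r =>
    by_cases ho : ('o' : Char) = c
    · subst ho
      have step : pvLoop pvNumberTrie ('o' :: r) = pvRun (pvChain ['n','e'] 1) r := by
        simp [pvLoop, pvGet, pvNumberTrie, pvChain, pv_run_loop]
      rw [step, pv_run_chain]
      split_ifs with hh
      · exact absurd (congrArg (List.cons 'o') hh) h1
      · rfl
    by_cases ht : ('t' : Char) = c
    · subst ht
      have step : pvLoop pvNumberTrie ('t' :: r)
          = pvRun (.sub (.cons 'w' (pvChain ['o'] 2) (.cons 'h' (pvChain ['r','e','e'] 3) .nil))) r := by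
        simp [pvLoop, pvGet, pvNumberTrie, pvChain, pv_run_loop]
      rw [step, pv_run_two _ _ _ _ _ _ _ (by decide)]
      split_ifs with hh hh'
      · exact absurd (congrArg (List.cons 't') hh) h2
      · exact absurd (congrArg (List.cons 't') hh') h3
      · rfl
    by_cases hf : ('f' : Char) = c
    · subst hf
      have step : pvLoop pvNumberTrie ('f' :: r)
          = pvRun (.sub (.cons 'o' (pvChain ['u','r'] 4) (.cons 'i' (pvChain ['v','e'] 5) .nil))) r := by
        simp [pvLoop, pvGet, pvNumberTrie, pvChain, pv_run_loop]
      rw [step, pv_run_two _ _ _ _ _ _ _ (by decide)]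
      split_ifs with hh hh'
      · exact absurd (congrArg (List.cons 'f') hh) h4
      · exact absurd (congrArg (List.cons 'f') hh') h5
      · rfl
    by_cases hs : ('s' : Char) = c
    · subst hs
      have step : pvLoop pvNumberTrie ('s' :: r)
          = pvRun (.sub (.cons 'i' (pvChain ['x'] 6) (.cons 'e' (pvChain ['v','e','n'] 7) .nil))) r := by
        simp [pvLoop, pvGet, pvNumberTrie, pvChain, pv_run_loop]
      rw [step, pv_run_two _ _ _ _ _ _ _ (by decide)]
      split_ifs with hh hh'
      · exact absurd (congrArg (List.cons 's') hh) h6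
      · exact absurd (congrArg (List.cons 's') hh') h7
      · rfl
    by_cases he : ('e' : Char) = c
    · subst he
      have step : pvLoop pvNumberTrie ('e' :: r) = pvRun (pvChain ['i','g','h','t'] 8) r := by
        simp [pvLoop, pvGet, pvNumberTrie, pvChain, pv_run_loop]
      rw [step, pv_run_chain]
      split_ifs with hh
      · exact absurd (congrArg (List.cons 'e') hh) h8
      · rfl
    by_cases hn : ('n' : Char) = c
    · subst hn
      have step : pvLoop pvNumberTrie ('n' :: r) = pvRun (pvChain ['i','n','e'] 9) r := by
        simp [pvLoop, pvGet, pvNumberTrie, pvChain, pv_run_loop]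
      rw [step, pv_run_chain]
      split_ifs with hh
      · exact absurd (congrArg (List.cons 'n') hh) h9
      · rfl
    · simp [pvLoop, pvGet, pvNumberTrie, ho, ht, hf, hs, he, hn]

-- shared simp set for evaluating A's scan on a decomposed tail
lemma pv_take_pos (t : List Char) (k : Nat) (w : List Char) (h : w = t.take k) :
    t = w ++ t.drop k := by
  conv_lhs => rw [← List.take_append_drop k t, ← h]

-- The trie descent computes exactly what A's enumerate-startswith scan computes.
lemma pv_core (t : List Char) :
    (PySem.List.enumerate pvNumbers 0).foldl
        (fun (acc : Option Int) (p : Int × String) =>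
          match acc with
          | some r => some r
          | none => if PySem.Chars.startswith t p.2.toList then some (p.1 + 1) else none)
        none
      = pvLoop pvNumberTrie t := by
  by_cases h1 : ['o','n','e'] = t.take 3
  · rw [pv_take_pos t 3 _ h1]
    simp [pvNumbers, PySem.List.enumerate, pv_sw, pvLoop, pvGet, pvNumberTrie, pv_len1]
  by_cases h2 : ['t','w','o'] = t.take 3
  · rw [pv_take_pos t 3 _ h2]
    simp [pvNumbers, PySem.List.enumerate, pv_sw, pvLoop, pvGet, pvNumberTrie, pv_len1, pv_len2]
  by_cases h3 : ['t','h','r','e','e'] = t.take 5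
  · rw [pv_take_pos t 5 _ h3]
    simp [pvNumbers, PySem.List.enumerate, pv_sw, pvLoop, pvGet, pvNumberTrie, pv_len1, pv_len2, pv_len3]
  by_cases h4 : ['f','o','u','r'] = t.take 4
  · rw [pv_take_pos t 4 _ h4]
    simp [pvNumbers, PySem.List.enumerate, pv_sw, pvLoop, pvGet, pvNumberTrie, pv_len1, pv_len2, pv_len3, pv_len4]
  by_cases h5 : ['f','i','v','e'] = t.take 4
  · rw [pv_take_pos t 4 _ h5]
    simp [pvNumbers, PySem.List.enumerate, pv_sw, pvLoop, pvGet, pvNumberTrie, pv_len1, pv_len2, pv_len3, pv_len4, pv_len5]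
  by_cases h6 : ['s','i','x'] = t.take 3
  · rw [pv_take_pos t 3 _ h6]
    simp [pvNumbers, PySem.List.enumerate, pv_sw, pvLoop, pvGet, pvNumberTrie, pv_len1, pv_len2, pv_len3, pv_len4, pv_len5, pv_len6]
  by_cases h7 : ['s','e','v','e','n'] = t.take 5
  · rw [pv_take_pos t 5 _ h7]
    simp [pvNumbers, PySem.List.enumerate, pv_sw, pvLoop, pvGet, pvNumberTrie, pv_len1, pv_len2, pv_len3, pv_len4, pv_len5, pv_len6, pv_len7]
  by_cases h8 : ['e','i','g','h','t'] = t.take 5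
  · rw [pv_take_pos t 5 _ h8]
    simp [pvNumbers, PySem.List.enumerate, pv_sw, pvLoop, pvGet, pvNumberTrie, pv_len1, pv_len2, pv_len3, pv_len4, pv_len5, pv_len6, pv_len7, pv_len8]
  by_cases h9 : ['n','i','n','e'] = t.take 4
  · rw [pv_take_pos t 4 _ h9]
    simp [pvNumbers, PySem.List.enumerate, pv_sw, pvLoop, pvGet, pvNumberTrie, pv_len1, pv_len2, pv_len3, pv_len4, pv_len5, pv_len6, pv_len7, pv_len8, pv_len9]
  · rw [pv_loop_none t h1 h2 h3 h4 h5 h6 h7 h8 h9]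
    simp [pvNumbers, PySem.List.enumerate, pv_sw, pv_len1, pv_len2, pv_len3, pv_len4, pv_len5, pv_len6, pv_len7, pv_len8, pv_len9, h1, h2, h3, h4, h5, h6, h7, h8, h9]

-- ===== VERDICT (by name: the statement is the Claim_ definition above) =====
theorem try_parse_digit_at_spec : Claim_equal_try_parse_digit_at := by
  intro s index _ hpre
  unfold Pre_try_parse_digit_at at hpre
  unfold Spec_try_parse_digit_at try_parse_digit_at try_parse_digit_at_alt
  obtain ⟨c, hc⟩ : ∃ c, PySem.Str.pyGet? s index = some c := by
    rw [PySem.Str.pyGet?_eq, PySem.Chars.pyGet?_eq_listPyGet?]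
    cases h : PySem.List.pyGet? s.toList index with
    | none => exact absurd ((PySem.List.pyGet?_eq_none_iff _ _).1 h) (not_not_intro hpre)
    | some c => exact ⟨c, rfl⟩
  rw [hc]
  by_cases hd : PySem.Chars.isdigit c = true
  · simp [hd]
  · simp only [Bool.not_eq_true] at hd
    simp only [hd, Bool.false_eq_true, if_false]
    rw [← pv_core (PySem.Str.slice s (some index) none).toList]
    apply PySem.List.foldl_congr_mem
    intro acc p _
    cases acc with
    | some r => rfl
    | none => rw [PySem.Str.startswith_eq]
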